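-- pv_equiv track=rewrite | github.com/gdiggit6/Daily-Agenda2 | tuples.py | count_spaces_commas_stops
-- ===== SOURCE A (Python) =====
-- def count_spaces_commas_stops ( x ) :
-- 	spaces, commas, stops = 0, 0, 0 # 3 counters set to 0 on 1 line instead of 3
-- 	for i in x :
-- 		if i == ' ' : # if space
-- 			spaces += 1 # add 1 to spaces counter variable
-- 		elif i == ',' : # if comma
-- 			commas += 1 # add 1 to commas counter variable
-- 		elif i == '.' : # if stop
-- 			stops += 1 # add 1 to stops couter variable
-- 	return ( spaces, commas, stops ) # return the values that each counter holds
-- ===== SOURCE B (Python) =====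
-- def count_spaces_commas_stops(x):
--     # three staged library scans instead of one branch-per-character loop
--     return (x.count(' '), x.count(','), x.count('.'))
-- ===== Notes on version B (the rewrite author's own statement) =====
-- stated objective: idiomatic
-- what changed: Replaces the single accumulator loop with three explicit branches by three separate str.count scans, one per character, with no hand-written loop.
import Mathlib
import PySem

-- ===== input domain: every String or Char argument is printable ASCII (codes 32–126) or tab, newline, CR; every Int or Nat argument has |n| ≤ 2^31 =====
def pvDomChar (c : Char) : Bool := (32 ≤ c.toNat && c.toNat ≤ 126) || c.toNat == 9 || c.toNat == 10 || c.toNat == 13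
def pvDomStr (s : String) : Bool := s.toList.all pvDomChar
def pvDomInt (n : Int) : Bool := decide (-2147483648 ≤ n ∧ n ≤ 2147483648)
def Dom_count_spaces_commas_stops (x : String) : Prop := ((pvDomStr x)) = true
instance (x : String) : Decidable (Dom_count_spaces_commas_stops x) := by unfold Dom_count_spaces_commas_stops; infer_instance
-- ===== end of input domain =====

-- B replaces A's single accumulator loop (three scalar counters, one branch per character) by three str.count library scans, one per character (idiomatic; no explicit loop).

-- ===== PORT A =====
def count_spaces_commas_stops (x : String) : Int × Int × Int :=
  x.toList.foldl
    (fun (acc : Int × Int × Int) i =>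
      let (spaces, commas, stops) := acc
      if i == ' ' then (spaces + 1, commas, stops)
      else if i == ',' then (spaces, commas + 1, stops)
      else if i == '.' then (spaces, commas, stops + 1)
      else (spaces, commas, stops))
    (0, 0, 0)

-- ===== PORT B =====
def count_spaces_commas_stops_alt (x : String) : Int × Int × Int :=
  ((PySem.Str.count x " " : Int), (PySem.Str.count x "," : Int), (PySem.Str.count x "." : Int))

-- ===== PRECONDITION & SPEC =====
def Spec_count_spaces_commas_stops (x : String) (out : Int × Int × Int) : Prop := out = count_spaces_commas_stops_alt x
instance (x : String) (out : Int × Int × Int) : Decidable (Spec_count_spaces_commas_stops x out) := by unfold Spec_count_spaces_commas_stops; infer_instance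

-- ===== CLAIM (what is proved, stated in full; the proofs are below) =====
def Claim_equal_count_spaces_commas_stops : Prop := ∀ (x : String), Dom_count_spaces_commas_stops x → Spec_count_spaces_commas_stops x (count_spaces_commas_stops x)

-- ===== LEMMAS AND PROOFS =====

-- Python's s.count(c) for a single character c is the element count of c in s.
theorem count_go_singleton (c : Char) (l : List Char) (acc : Nat) :
    PySem.Chars.count.go [c] l.length l acc = acc + l.count c := by
  induction l generalizing acc with
  | nil => simp [PySem.Chars.count.go]
  | cons h t ih =>
      by_cases hc : h = c
      · simpa [PySem.Chars.count.go, List.isPrefixOf, hc, List.count_cons,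
          Nat.add_comm, Nat.add_left_comm] using ih (acc + 1)
      · simpa [PySem.Chars.count.go, List.isPrefixOf, hc, List.count_cons,
          Ne.symm hc] using ih acc

theorem count_singleton (c : Char) (l : List Char) :
    PySem.Chars.count l [c] = l.count c := by
  simp [PySem.Chars.count, count_go_singleton]

-- A's loop computes the three occurrence counts.
theorem foldl_counts (l : List Char) (a b c : Int) :
    l.foldl
      (fun (acc : Int × Int × Int) i =>
        let (spaces, commas, stops) := acc
        if i == ' ' then (spaces + 1, commas, stops)
        else if i == ',' then (spaces, commas + 1, stops)
        else if i == '.' then (spaces, commas, stops + 1)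
        else (spaces, commas, stops))
      (a, b, c)
    = (a + l.count ' ', b + l.count ',', c + l.count '.') := by
  induction l generalizing a b c with
  | nil => simp
  | cons h t ih =>
      by_cases h1 : h = ' '
      · simpa [h1, List.count_cons, add_comm, add_left_comm, add_assoc] using ih (a + 1) b c
      · by_cases h2 : h = ','
        · simpa [h1, h2, List.count_cons, add_comm, add_left_comm, add_assoc] using ih a (b + 1) c
        · by_cases h3 : h = '.'
          · simpa [h1, h2, h3, List.count_cons, add_comm, add_left_comm, add_assoc] using ih a b (c + 1)
          · simpa [h1, h2, h3, List.count_cons] using ih a b c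

-- ===== VERDICT (by name: the statement is the Claim_ definition above) =====
theorem count_spaces_commas_stops_spec : Claim_equal_count_spaces_commas_stops := by
  intro x _
  unfold Spec_count_spaces_commas_stops count_spaces_commas_stops count_spaces_commas_stops_alt
  rw [foldl_counts]
  simp [PySem.Str.count_eq, count_singleton]
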